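-- pv_equiv track=rewrite | github.com/marialuiza15/Computa-oAplicada-INF1026 | TUPLAS/ListaFiltrada/Avancado2.py | maiorNumeroAcertos
-- ===== SOURCE A (Python) =====
-- def maiorNumeroAcertos(tJogos, resultado):
--     qtdAcertos = 0
--     listaAcertadores = []
--     acertos = 0
--     for jogo in tJogos:
--         nome = jogo[0]
--         acertos = 0
--         for numero in jogo[1]:
--             if numero in resultado:
--                 acertos+=1
--         if acertos>qtdAcertos:
--             qtdAcertos = acertos
--             listaAcertadores.clear()
--             listaAcertadores.append(nome)
--         elif acertos == qtdAcertos and nome not in listaAcertadores: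
--             listaAcertadores.append(nome)
--     return tuple([qtdAcertos, tuple(listaAcertadores)])
-- ===== SOURCE B (Python) =====
-- def maiorNumeroAcertos(tJogos, resultado):
--     pares = [(jogo[0], sum(1 for numero in jogo[1] if numero in resultado)) for jogo in tJogos]
--     best = max((acertos for _, acertos in pares), default=0)
--     vencedores = []
--     for nome, acertos in pares:
--         if acertos == best and nome not in vencedores:
--             vencedores.append(nome)
--     return tuple([best, tuple(vencedores)])
-- ===== Notes on version B (the rewrite author's own statement) =====
-- stated objective: simpler
-- what changed: B separates concerns into three plain passes (build (name,count) pairs, take the max count with default 0, collect dedup'd names matching it) instead of A's single stateful loop with running-max/clear/append bookkeeping.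
import Mathlib
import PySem

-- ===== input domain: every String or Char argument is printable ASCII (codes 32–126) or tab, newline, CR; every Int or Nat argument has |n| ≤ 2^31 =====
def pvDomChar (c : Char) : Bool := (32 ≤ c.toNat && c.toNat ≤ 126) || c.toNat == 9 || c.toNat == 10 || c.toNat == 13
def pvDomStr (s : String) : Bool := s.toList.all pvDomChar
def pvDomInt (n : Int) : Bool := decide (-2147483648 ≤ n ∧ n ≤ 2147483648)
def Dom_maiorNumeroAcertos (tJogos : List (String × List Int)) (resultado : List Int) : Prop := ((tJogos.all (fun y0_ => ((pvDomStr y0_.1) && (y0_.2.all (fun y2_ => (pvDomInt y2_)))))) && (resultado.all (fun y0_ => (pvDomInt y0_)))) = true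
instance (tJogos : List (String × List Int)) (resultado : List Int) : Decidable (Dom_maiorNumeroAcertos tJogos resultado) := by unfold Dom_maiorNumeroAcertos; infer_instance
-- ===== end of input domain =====

-- B replaces A's single stateful running-max loop by three plain passes (pair up counts, take the max with default 0, collect matching names); objective: simpler.


-- ===== PORT A =====
-- literal transliteration: one fold over tJogos carrying (qtdAcertos, listaAcertadores);
-- the inner loop over jogo[1] is a fold accumulating 'acertos'
def maiorNumeroAcertos (tJogos : List (String × List Int)) (resultado : List Int) : Int × List String :=
  let st := tJogos.foldl (fun (st : Int × List String) jogo =>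
      let nome := jogo.1
      let acertos := jogo.2.foldl (fun a numero => if numero ∈ resultado then a + 1 else a) (0 : Int)
      if acertos > st.1 then (acertos, [nome])
      else if acertos = st.1 ∧ nome ∉ st.2 then (st.1, st.2 ++ [nome])
      else st) ((0 : Int), ([] : List String))
  st

-- ===== PORT B =====
-- literal transliteration of Source B: build pares, take max with default 0, collect winners
def maiorNumeroAcertos_alt (tJogos : List (String × List Int)) (resultado : List Int) : Int × List String :=
  let pares := tJogos.map (fun jogo =>
      (jogo.1, ((jogo.2.filter (fun numero => numero ∈ resultado)).length : Int)))
  let best := (PySem.List.max? (pares.map Prod.snd) (fun x => x)).getD 0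
  let vencedores := pares.foldl (fun acc p =>
      if p.2 = best ∧ p.1 ∉ acc then acc ++ [p.1] else acc) ([] : List String)
  (best, vencedores)

-- ===== PRECONDITION & SPEC =====
def Spec_maiorNumeroAcertos (tJogos : List (String × List Int)) (resultado : List Int) (out : Int × List String) : Prop := out = maiorNumeroAcertos_alt tJogos resultado
instance (tJogos : List (String × List Int)) (resultado : List Int) (out : Int × List String) : Decidable (Spec_maiorNumeroAcertos tJogos resultado out) := by unfold Spec_maiorNumeroAcertos; infer_instance

-- ===== CLAIM (what is proved, stated in full; the proofs are below) =====
def Claim_equal_maiorNumeroAcertos : Prop := ∀ (tJogos : List (String × List Int)) (resultado : List Int), Dom_maiorNumeroAcertos tJogos resultado → Spec_maiorNumeroAcertos tJogos resultado (maiorNumeroAcertos tJogos resultado)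

-- ===== LEMMAS AND PROOFS =====

-- count of matching numbers, B-style (filter length)
def pvCnt (resultado : List Int) (jogo : String × List Int) : Int :=
  ((jogo.2.filter (fun numero => numero ∈ resultado)).length : Int)

-- the running max of the counts, with base 0
def pvBest (resultado : List Int) (l : List (String × List Int)) : Int :=
  l.foldl (fun m p => max m (pvCnt resultado p)) 0

-- winners collected for a given target value b
def pvWin (resultado : List Int) (b : Int) (l : List (String × List Int)) (acc : List String) : List String :=
  l.foldl (fun acc p => if pvCnt resultado p = b ∧ p.1 ∉ acc then acc ++ [p.1] else acc) acc

-- A's inner counting loop equals the filter-length count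
theorem pvCntA_eq (resultado : List Int) (ns : List Int) (a : Int) :
    ns.foldl (fun a numero => if numero ∈ resultado then a + 1 else a) a
      = a + ((ns.filter (fun numero => numero ∈ resultado)).length : Int) := by
  induction ns generalizing a with
  | nil => simp
  | cons x t ih =>
    by_cases h : x ∈ resultado <;> simp [List.foldl_cons, h, ih] <;> push_cast <;> ring

theorem pvBest_base_le (resultado : List Int) (l : List (String × List Int)) (a : Int) :
    a ≤ l.foldl (fun m p => max m (pvCnt resultado p)) a := by
  induction l generalizing a with
  | nil => simp
  | cons x t ih => exact le_trans (le_max_left _ _) (ih _)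

theorem pvBest_ge (resultado : List Int) (l : List (String × List Int)) (a : Int)
    (p : String × List Int) (hp : p ∈ l) :
    pvCnt resultado p ≤ l.foldl (fun m q => max m (pvCnt resultado q)) a := by
  induction l generalizing a with
  | nil => cases hp
  | cons x t ih =>
    rcases List.mem_cons.mp hp with h | h
    · subst h; exact le_trans (le_max_right _ _) (pvBest_base_le _ _ _)
    · exact ih _ h

-- with all counts below b the winners fold adds nothing
theorem pvWin_empty (resultado : List Int) (b : Int) (l : List (String × List Int))
    (acc : List String) (h : ∀ p ∈ l, pvCnt resultado p < b) :
    pvWin resultado b l acc = acc := by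
  induction l generalizing acc with
  | nil => rfl
  | cons x t ih =>
    have hx : pvCnt resultado x ≠ b := ne_of_lt (h x (List.mem_cons_self ..))
    simp only [pvWin, List.foldl_cons, hx, false_and, if_false]
    exact ih acc (fun p hp => h p (List.mem_cons_of_mem _ hp))

-- the core invariant: A's fold on l equals (running max, winners for that max)
theorem pvInv (resultado : List Int) (l : List (String × List Int)) :
    l.foldl (fun (st : Int × List String) jogo =>
      let nome := jogo.1
      let acertos := jogo.2.foldl (fun a numero => if numero ∈ resultado then a + 1 else a) (0 : Int)
      if acertos > st.1 then (acertos, [nome])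
      else if acertos = st.1 ∧ nome ∉ st.2 then (st.1, st.2 ++ [nome])
      else st) ((0 : Int), ([] : List String))
    = (pvBest resultado l, pvWin resultado (pvBest resultado l) l []) := by
  induction l using List.reverseRecOn with
  | nil => rfl
  | append_singleton t x ih =>
    have hcx : x.2.foldl (fun a numero => if numero ∈ resultado then a + 1 else a) (0 : Int)
        = pvCnt resultado x := by
      simpa [pvCnt] using pvCntA_eq resultado x.2 0
    have hbest : pvBest resultado (t ++ [x]) = max (pvBest resultado t) (pvCnt resultado x) := by
      simp [pvBest, List.foldl_append]
    rw [List.foldl_append, ih]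
    by_cases h1 : pvCnt resultado x > pvBest resultado t
    · -- new strict max: clear and append
      have hb : pvBest resultado (t ++ [x]) = pvCnt resultado x := by
        rw [hbest]; exact max_eq_right (le_of_lt h1)
      have hw : pvWin resultado (pvCnt resultado x) t [] = [] :=
        pvWin_empty _ _ _ _ (fun p hp => lt_of_le_of_lt (pvBest_ge resultado t 0 p hp) h1)
      simp only [pvWin] at hw
      simp only [List.foldl_cons, List.foldl_nil, hcx, h1, if_pos]
      rw [hb]
      simp [pvWin, List.foldl_append, hw]
    · have hle : pvCnt resultado x ≤ pvBest resultado t := le_of_not_gt h1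
      have hb : pvBest resultado (t ++ [x]) = pvBest resultado t := by
        rw [hbest]; exact max_eq_left hle
      simp only [List.foldl_cons, List.foldl_nil, hcx, h1, if_neg, if_false, gt_iff_lt,
        not_lt.mpr hle]
      rw [hb]
      by_cases h2 : pvCnt resultado x = pvBest resultado t ∧ x.1 ∉ pvWin resultado (pvBest resultado t) t []
      · have h2' := h2
        simp only [pvWin] at h2'
        simp only [h2, if_true]
        simp only [pvWin, List.foldl_append, List.foldl_cons, List.foldl_nil]
        rw [if_pos h2']
        simp
      · have h2' := h2
        simp only [pvWin] at h2'
        simp only [h2, if_false]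
        simp only [pvWin, List.foldl_append, List.foldl_cons, List.foldl_nil]
        rw [if_neg h2']

-- B's max-with-default-0 equals the running max pvBest (all counts are ≥ 0)
theorem pvMaxEq (resultado : List Int) (l : List (String × List Int)) :
    (PySem.List.max? ((l.map (fun jogo =>
        (jogo.1, ((jogo.2.filter (fun numero => numero ∈ resultado)).length : Int)))).map Prod.snd)
        (fun x => x)).getD 0 = pvBest resultado l := by
  have key : ∀ (m : List (String × List Int)) (a : Int), 0 ≤ a →
      (m.map (fun p => pvCnt resultado p)).foldl max a
        = m.foldl (fun b p => max b (pvCnt resultado p)) a := by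
    intro m; induction m with
    | nil => intro a _; rfl
    | cons x t ih =>
      intro a ha
      simp only [List.map_cons, List.foldl_cons]
      exact ih _ (le_trans ha (le_max_left _ _))
  cases l with
  | nil => rfl
  | cons x t =>
    have hmap : ((x :: t).map (fun jogo =>
        (jogo.1, ((jogo.2.filter (fun numero => numero ∈ resultado)).length : Int)))).map Prod.snd
        = (x :: t).map (fun p => pvCnt resultado p) := by
      simp [pvCnt]
    rw [hmap]
    simp only [List.map_cons, PySem.List.max?_id_cons, Option.getD_some]
    rw [key t (pvCnt resultado x) (by simp [pvCnt])]
    have : pvBest resultado (x :: t)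
        = t.foldl (fun b p => max b (pvCnt resultado p)) (max 0 (pvCnt resultado x)) := rfl
    rw [this]
    have h0 : max 0 (pvCnt resultado x) = pvCnt resultado x :=
      max_eq_right (by simp [pvCnt])
    rw [h0]

-- ===== VERDICT (by name: the statement is the Claim_ definition above) =====
theorem maiorNumeroAcertos_spec : Claim_equal_maiorNumeroAcertos := by
  intro tJogos resultado _
  unfold Spec_maiorNumeroAcertos maiorNumeroAcertos maiorNumeroAcertos_alt
  simp only [pvMaxEq resultado tJogos, List.foldl_map]
  rw [pvInv]
  rfl
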